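-- pv_equiv track=rewrite | github.com/pratik1707/leetcode | 2690-house-robber-iv/2690-house-robber-iv.py | can_rob
-- ===== SOURCE A (Python) =====
-- def can_rob(nums, val, k):
--     index = 0
--     count = 0
--
--     while(index < len(nums)):
--         if nums[index] <= val:
--             count += 1
--             index += 2
--         else:
--             index += 1
--
--     return count >= k
-- ===== SOURCE B (Python) =====
-- def can_rob(nums, val, k):
--     # Forward DP for maximum independent set on a path of "good" houses (value <= val).
--     prev2 = 0  # best count among houses before the previous one
--     prev1 = 0  # best count among all houses seen so far
--     for x in nums:
--         good = 1 if x <= val else 0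
--         prev2, prev1 = prev1, max(prev1, good + prev2)
--     return prev1 >= k
-- ===== Notes on version B (the rewrite author's own statement) =====
-- stated objective: alternative
-- what changed: Replaced the greedy index-jumping while loop (take a good house, skip the next index) with the standard two-variable forward DP dp[i]=max(dp[i-1], good[i]+dp[i-2]) for maximum non-adjacent selection, which yields the same count.
import Mathlib
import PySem

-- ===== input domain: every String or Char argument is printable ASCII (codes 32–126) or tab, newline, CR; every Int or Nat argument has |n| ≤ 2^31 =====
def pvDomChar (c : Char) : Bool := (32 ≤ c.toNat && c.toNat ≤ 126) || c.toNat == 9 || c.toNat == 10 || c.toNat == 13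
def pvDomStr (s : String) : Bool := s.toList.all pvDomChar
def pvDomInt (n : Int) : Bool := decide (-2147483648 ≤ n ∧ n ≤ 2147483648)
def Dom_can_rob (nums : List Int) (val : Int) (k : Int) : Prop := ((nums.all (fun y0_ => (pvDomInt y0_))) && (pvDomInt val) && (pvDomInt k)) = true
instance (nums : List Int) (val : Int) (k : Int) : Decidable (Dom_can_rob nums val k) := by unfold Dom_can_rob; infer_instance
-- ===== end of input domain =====

-- B replaces A's greedy index-jumping scan with a two-variable forward DP
-- (max non-adjacent selection recurrence); same result, alternative algorithm.


-- ===== PORT A =====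
-- the while loop: index jumps by 2 after taking a good house, else by 1
def canRobLoopA (nums : List Int) (val : Int) (index : Nat) (count : Int) : Int :=
  if h : index < nums.length then
    if nums[index] ≤ val then
      canRobLoopA nums val (index + 2) (count + 1)
    else
      canRobLoopA nums val (index + 1) count
  else count
termination_by nums.length - index
decreasing_by all_goals omega

def can_rob (nums : List Int) (val : Int) (k : Int) : Bool :=
  decide (canRobLoopA nums val 0 0 ≥ k)

-- ===== PORT B =====
-- one DP step of Source B's for loop: (prev2, prev1) ↦ (prev1, max prev1 (good + prev2))
def canRobStepB (val : Int) (s : Int × Int) (x : Int) : Int × Int :=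
  (s.2, max s.2 ((if x ≤ val then 1 else 0) + s.1))

def can_rob_alt (nums : List Int) (val : Int) (k : Int) : Bool :=
  decide ((nums.foldl (canRobStepB val) (0, 0)).2 ≥ k)

-- ===== PRECONDITION & SPEC =====
def Spec_can_rob (nums : List Int) (val : Int) (k : Int) (out : Bool) : Prop := out = can_rob_alt nums val k
instance (nums : List Int) (val : Int) (k : Int) (out : Bool) : Decidable (Spec_can_rob nums val k out) := by unfold Spec_can_rob; infer_instance

-- ===== CLAIM (what is proved, stated in full; the proofs are below) =====
def Claim_equal_can_rob : Prop := ∀ (nums : List Int) (val : Int) (k : Int), Dom_can_rob nums val k → Spec_can_rob nums val k (can_rob nums val k)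

-- ===== LEMMAS AND PROOFS =====

-- number of good houses A's greedy takes, on the boolean "good" list
def pvGreedy : List Bool → Int
  | [] => 0
  | false :: t => pvGreedy t
  | true :: t => 1 + pvGreedy (t.drop 1)
termination_by l => l.length
decreasing_by all_goals (simp only [List.length_drop, List.length_cons]; omega)

-- maximum number of non-adjacent good houses (max independent set on a path)
def pvMis : List Bool → Int
  | [] => 0
  | x :: r => max (pvMis r) ((if x then 1 else 0) + pvMis (r.drop 1))
termination_by l => l.length
decreasing_by all_goals (simp only [List.length_drop, List.length_cons]; omega)

lemma pvMis_le_cons (x : Bool) (r : List Bool) : pvMis r ≤ pvMis (x :: r) := by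
  rw [pvMis]; exact le_max_left _ _

lemma pvMis_cons_le (x : Bool) (r : List Bool) : pvMis (x :: r) ≤ 1 + pvMis r := by
  rw [pvMis]
  rcases r with _ | ⟨y, r'⟩
  · simp; split <;> omega
  · have h1 : pvMis (y :: r') ≤ 1 + pvMis (y :: r') := by omega
    have h2 : pvMis r' ≤ pvMis (y :: r') := pvMis_le_cons y r'
    simp only [List.drop_succ_cons, List.drop_zero]
    apply max_le h1
    split <;> omega

-- the leftmost greedy attains the maximum
lemma pvGreedy_eq_pvMis : ∀ (l : List Bool), pvGreedy l = pvMis l := by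
  have key : ∀ (n : Nat) (l : List Bool), l.length ≤ n → pvGreedy l = pvMis l := by
    intro n
    induction n with
    | zero => intro l hl; have : l = [] := by cases l <;> simp_all
              subst this; simp [pvGreedy, pvMis]
    | succ n ih =>
      intro l hl
      rcases l with _ | ⟨x, t⟩
      · simp [pvGreedy, pvMis]
      · rcases x with _ | _
        · -- false :: t
          rw [pvGreedy, pvMis, ih t (by simp at hl; omega)]
          have h2 : pvMis (t.drop 1) ≤ pvMis t := by
            rcases t with _ | ⟨y, t'⟩
            · simp
            · simpa using pvMis_le_cons y t'
          simp only [if_neg Bool.false_ne_true, Int.zero_add]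
          omega
        · -- true :: t
          rw [pvGreedy, pvMis, ih (t.drop 1) (by simp at hl ⊢; omega)]
          have h2 : pvMis t ≤ 1 + pvMis (t.drop 1) := by
            rcases t with _ | ⟨y, t'⟩
            · simp
            · simpa using pvMis_cons_le y t'
          simp only [max_def]
          split_ifs <;> simp_all
  exact fun l => key l.length l le_rfl

-- A's loop counts greedily over the suffix from `index`
lemma canRobLoopA_eq (nums : List Int) (val : Int) :
    ∀ (n index : Nat) (count : Int), nums.length - index ≤ n →
      canRobLoopA nums val index count
        = count + pvGreedy ((nums.drop index).map (fun x => decide (x ≤ val))) := by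
  intro n
  induction n with
  | zero =>
    intro index count h
    have hge : nums.length ≤ index := by omega
    rw [canRobLoopA, dif_neg (by omega), List.drop_eq_nil_of_le hge]
    simp [pvGreedy]
  | succ n ih =>
    intro index count h
    by_cases hlt : index < nums.length
    · have hdrop : nums.drop index = nums[index] :: nums.drop (index + 1) :=
        List.drop_eq_getElem_cons hlt
      rw [canRobLoopA, dif_pos hlt, hdrop]
      by_cases hle : nums[index] ≤ val
      · rw [if_pos hle, ih (index + 2) (count + 1) (by omega)]
        simp only [List.map_cons, decide_eq_true hle, pvGreedy]
        simp [List.map_drop, List.drop_drop]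
        ring
      · rw [if_neg hle, ih (index + 1) count (by omega)]
        simp only [List.map_cons, decide_eq_false hle, pvGreedy]
    · have hge : nums.length ≤ index := by omega
      rw [canRobLoopA, dif_neg (by omega), List.drop_eq_nil_of_le hge]
      simp [pvGreedy]

-- the pair (a,b) tracking B's fold symbolically: result = max (p1 + a) (p2 + b)
def pvAB : List Bool → Int × Int
  | [] => (0, 0)
  | x :: r => (max (pvAB r).1 (pvAB r).2, (if x then 1 else 0) + (pvAB r).1)

lemma foldl_stepB (val : Int) :
    ∀ (l : List Int) (p2 p1 : Int), p2 ≤ p1 →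
      (l.foldl (canRobStepB val) (p2, p1)).2
        = max (p1 + (pvAB (l.map (fun x => decide (x ≤ val)))).1)
              (p2 + (pvAB (l.map (fun x => decide (x ≤ val)))).2) := by
  intro l
  induction l with
  | nil => intro p2 p1 h; simp [pvAB]; omega
  | cons x t ih =>
    intro p2 p1 h
    have hstep : canRobStepB val (p2, p1) x
        = (p1, max p1 ((if x ≤ val then 1 else 0) + p2)) := rfl
    rw [List.foldl_cons, hstep,
        ih p1 (max p1 ((if x ≤ val then 1 else 0) + p2)) (le_max_left _ _)]
    simp only [List.map_cons, pvAB]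
    rcases le_total p1 ((if x ≤ val then 1 else 0) + p2) with hc | hc <;>
      [skip; skip] <;>
    · by_cases hx : x ≤ val <;>
        simp only [hx, decide_eq_true, if_pos] <;>
        simp [max_def] <;> split_ifs <;> omega

lemma pvAB_spec : ∀ (l : List Bool),
    (pvAB l).1 = pvMis (l.drop 1) ∧ max (pvAB l).1 (pvAB l).2 = pvMis l := by
  intro l
  induction l with
  | nil => constructor <;> simp [pvAB, pvMis]
  | cons x r ih =>
    obtain ⟨ih1, ih2⟩ := ih
    constructor
    · show max (pvAB r).1 (pvAB r).2 = pvMis ((x :: r).drop 1)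
      simpa using ih2
    · show max (max (pvAB r).1 (pvAB r).2) ((if x then 1 else 0) + (pvAB r).1)
          = pvMis (x :: r)
      rw [ih2, ih1, pvMis]

-- ===== VERDICT (by name: the statement is the Claim_ definition above) =====
theorem can_rob_spec : Claim_equal_can_rob := by
  intro nums val k _
  unfold Spec_can_rob can_rob can_rob_alt
  rw [canRobLoopA_eq nums val (nums.length) 0 0 (by omega),
      foldl_stepB val nums 0 0 le_rfl]
  obtain ⟨h1, h2⟩ := pvAB_spec (nums.map (fun x => decide (x ≤ val)))
  rw [pvGreedy_eq_pvMis]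
  simp only [List.drop_zero, zero_add]
  rw [h2]
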